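-- pv_equiv track=rewrite | github.com/Brenner87/Projects | CodeAbby/knitting/knitting.py | calculate_nums_in_block
-- ===== SOURCE A (Python) =====
-- def calculate_nums_in_block(row_num, starting_from, rows_in_block, adding_each, results_num):
--     count = 0
--     results = []
--     start_pos = starting_from or 1
--     for i in range(start_pos, row_num + 1):
--         count += 1
--         if adding_each[0] == count:
--             adding_each.append(adding_each.pop(0))
--             count = 0
--             num_in_block = i % rows_in_block or rows_in_block
--             results.append(num_in_block)
--     if results_num and len(results) > results_num:
--         return results[:results_num]
--     return results
-- ===== SOURCE B (Python) =====
-- def calculate_nums_in_block(row_num, starting_from, rows_in_block, adding_each, results_num):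
--     results = []
--     pos = (starting_from or 1) - 1
--     k = 0
--     L = len(adding_each)
--     while pos < row_num:
--         step = adding_each[k]
--         if step < 1 or pos + step > row_num:
--             break
--         pos += step
--         k += 1
--         if k == L:
--             k = 0
--         results.append(pos % rows_in_block or rows_in_block)
--     if k:
--         adding_each[:] = adding_each[k:] + adding_each[:k]
--     if results_num and len(results) > results_num:
--         return results[:results_num]
--     return results
-- ===== Notes on version B (the rewrite author's own statement) =====
-- stated objective: alternative
-- what changed: B jumps from hit to hit, reading adding_each through a cyclic index and applying the net rotation once at the end, instead of A's per-row scan with a running counter and a pop(0)/append rotation at every hit.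
import Mathlib
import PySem

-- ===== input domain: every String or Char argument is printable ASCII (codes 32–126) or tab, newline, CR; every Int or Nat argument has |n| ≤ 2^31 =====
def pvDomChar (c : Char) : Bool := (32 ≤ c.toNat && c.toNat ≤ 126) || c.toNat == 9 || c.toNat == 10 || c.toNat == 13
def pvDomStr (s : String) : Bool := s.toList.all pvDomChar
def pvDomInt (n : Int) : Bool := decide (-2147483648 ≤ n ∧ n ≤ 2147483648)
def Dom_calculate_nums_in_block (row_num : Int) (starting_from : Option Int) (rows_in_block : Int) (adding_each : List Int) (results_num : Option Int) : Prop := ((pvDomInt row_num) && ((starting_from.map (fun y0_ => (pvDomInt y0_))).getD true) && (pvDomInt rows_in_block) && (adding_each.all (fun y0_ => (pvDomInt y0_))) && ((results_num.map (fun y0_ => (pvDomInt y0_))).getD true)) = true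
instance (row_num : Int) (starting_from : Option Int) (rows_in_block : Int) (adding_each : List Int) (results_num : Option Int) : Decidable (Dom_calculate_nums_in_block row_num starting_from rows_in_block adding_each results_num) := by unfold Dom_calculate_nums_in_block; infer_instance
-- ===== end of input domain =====

-- B jumps from hit to hit, reading adding_each through a cyclic index instead of A's per-row
-- scan with per-hit pop(0)/append rotations; A mutates adding_each in place (one rotation per
-- hit) and B applies the same net rotation once at the end (identical final list state); the
-- equivalence proved here is about the return value.

-- `starting_from or 1` / the truthiness test on an Optional[int]: None and 0 are falsy
def pvOrOne (o : Option Int) : Int :=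
  match o with
  | none => 1
  | some x => if x = 0 then 1 else x

-- `i % rows_in_block or rows_in_block`
def pvNib (i rib : Int) : Int :=
  let m := PySem.Int.mod i rib
  if m = 0 then rib else m

-- the two identical final lines of both Pythons: `if results_num and len(results) > results_num: return results[:results_num]`
def pvTrunc (res : List Int) (results_num : Option Int) : List Int :=
  match results_num with
  | none => res
  | some v => if v ≠ 0 ∧ v < (res.length : Int) then PySem.List.slice res none (some v) else res

-- ===== PORT A =====
-- one iteration of A's for-body; state = (count, adding_each, results); none = raised
def stepA (rib : Int) (st : Option (Int × List Int × List Int)) (i : Int) :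
    Option (Int × List Int × List Int) :=
  match st with
  | none => none
  | some (count, ae, res) =>
    let count := count + 1
    match PySem.List.pyGet? ae 0 with      -- adding_each[0]; none = IndexError
    | none => none
    | some a0 =>
      if a0 = count then
        match PySem.List.pop? ae 0 with    -- adding_each.pop(0)
        | none => none
        | some (x, rest) =>
          if rib = 0 then none             -- i % 0 = ZeroDivisionError
          else some (0, rest ++ [x], res ++ [pvNib i rib])
      else some (count, ae, res)

def calculate_nums_in_block (row_num : Int) (starting_from : Option Int) (rows_in_block : Int) (adding_each : List Int) (results_num : Option Int) : List Int :=
  let start_pos := pvOrOne starting_from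
  match (PySem.List.pyRange start_pos (row_num + 1) 1).foldl (stepA rows_in_block)
          (some (0, adding_each, [])) with
  | none => []                              -- unreachable under Pre_
  | some (_, _, results) => pvTrunc results results_num

-- ===== PORT B =====
-- B's while loop: jump by adding_each[k] (cyclic index k); one iteration per result.
-- B's final `adding_each[:] = adding_each[k:] + adding_each[:k]` only mutates the argument
-- and does not affect the return value, so it has no counterpart in the port.
def altLoop (row_num rib : Int) (ae : List Int) (L : Int) (k : Int) (pos : Int) (res : List Int) : List Int :=
  if _h : pos < row_num then
    match PySem.List.pyGet? ae k with      -- adding_each[k]; none = IndexError, outside Pre_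
    | none => res
    | some step =>
      if h2 : step < 1 ∨ row_num < pos + step then res
      else
        altLoop row_num rib ae L (if k + 1 = L then 0 else k + 1) (pos + step)
          (res ++ [pvNib (pos + step) rib])
  else res
termination_by (row_num - pos).toNat
decreasing_by
  rcases not_or.mp h2 with ⟨h3, h4⟩
  omega

def calculate_nums_in_block_alt (row_num : Int) (starting_from : Option Int) (rows_in_block : Int) (adding_each : List Int) (results_num : Option Int) : List Int :=
  pvTrunc
    (altLoop row_num rows_in_block adding_each (adding_each.length : Int) 0
      (pvOrOne starting_from - 1) [])
    results_num

-- ===== PRECONDITION & SPEC =====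
-- Pre_ excludes exactly the inputs where A raises: IndexError (empty adding_each while the
-- row range is nonempty) and ZeroDivisionError (rows_in_block = 0 while at least one hit occurs).
def Pre_calculate_nums_in_block (row_num : Int) (starting_from : Option Int) (rows_in_block : Int) (adding_each : List Int) (results_num : Option Int) : Prop :=
  (pvOrOne starting_from ≤ row_num → adding_each ≠ []) ∧
  (rows_in_block = 0 →
    ¬ (adding_each ≠ [] ∧ 1 ≤ adding_each.headI ∧
       pvOrOne starting_from - 1 + adding_each.headI ≤ row_num))
instance (row_num : Int) (starting_from : Option Int) (rows_in_block : Int) (adding_each : List Int) (results_num : Option Int) : Decidable (Pre_calculate_nums_in_block row_num starting_from rows_in_block adding_each results_num) := by unfold Pre_calculate_nums_in_block; infer_instance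

def pvWitness_calculate_nums_in_block : Int × Option Int × Int × List Int × Option Int :=
  (10, some 2, 3, [2, 1], some 2)

def Spec_calculate_nums_in_block (row_num : Int) (starting_from : Option Int) (rows_in_block : Int) (adding_each : List Int) (results_num : Option Int) (out : List Int) : Prop := out = calculate_nums_in_block_alt row_num starting_from rows_in_block adding_each results_num
instance (row_num : Int) (starting_from : Option Int) (rows_in_block : Int) (adding_each : List Int) (results_num : Option Int) (out : List Int) : Decidable (Spec_calculate_nums_in_block row_num starting_from rows_in_block adding_each results_num out) := by unfold Spec_calculate_nums_in_block; infer_instance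

-- ===== CLAIM (what is proved, stated in full; the proofs are below) =====
def Claim_equal_calculate_nums_in_block : Prop := ∀ (row_num : Int) (starting_from : Option Int) (rows_in_block : Int) (adding_each : List Int) (results_num : Option Int), Dom_calculate_nums_in_block row_num starting_from rows_in_block adding_each results_num → Pre_calculate_nums_in_block row_num starting_from rows_in_block adding_each results_num → Spec_calculate_nums_in_block row_num starting_from rows_in_block adding_each results_num (calculate_nums_in_block row_num starting_from rows_in_block adding_each results_num)

-- ===== LEMMAS AND PROOFS =====

theorem altLoop_stop (row_num rib L k pos : Int) (ae res : List Int) (h : ¬ pos < row_num) :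
    altLoop row_num rib ae L k pos res = res := by
  rw [altLoop.eq_def, dif_neg h]

theorem altLoop_get_stop (row_num rib L k pos step : Int) (ae res : List Int)
    (h : pos < row_num) (hget : PySem.List.pyGet? ae k = some step)
    (h2 : step < 1 ∨ row_num < pos + step) :
    altLoop row_num rib ae L k pos res = res := by
  rw [altLoop.eq_def, dif_pos h, hget]
  simp [h2]

theorem altLoop_get_step (row_num rib L k pos step : Int) (ae res : List Int)
    (h : pos < row_num) (hget : PySem.List.pyGet? ae k = some step)
    (h2 : ¬ (step < 1 ∨ row_num < pos + step)) :
    altLoop row_num rib ae L k pos res =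
      altLoop row_num rib ae L (if k + 1 = L then 0 else k + 1) (pos + step)
        (res ++ [pvNib (pos + step) rib]) := by
  rw [altLoop.eq_def, dif_pos h, hget]
  simp [h2]

-- counting up towards the head a0: the fold ticks until the hit at pos + (a0 - c), if in range
theorem tickA (rib : Int) : ∀ n : Nat, ∀ r pos c a0 : Int, ∀ rest res : List Int,
    (r - pos).toNat = n → 0 ≤ c → c < a0 →
    (PySem.List.pyRange (pos + 1) (r + 1) 1).foldl (stepA rib) (some (c, a0 :: rest, res)) =
      if pos + (a0 - c) ≤ r then
        (PySem.List.pyRange (pos + (a0 - c) + 1) (r + 1) 1).foldl (stepA rib)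
          (if rib = 0 then none
           else some (0, rest ++ [a0], res ++ [pvNib (pos + (a0 - c)) rib]))
      else some (c + max (r - pos) 0, a0 :: rest, res) := by
  intro n
  induction n with
  | zero =>
    intro r pos c a0 rest res hn hc hca
    have hpr : r ≤ pos := by omega
    rw [PySem.List.pyRange_one_eq_nil (by omega)]
    have : ¬ pos + (a0 - c) ≤ r := by omega
    simp only [List.foldl_nil, if_neg this]
    have : max (r - pos) 0 = 0 := by omega
    rw [this]; ring_nf
  | succ m ih =>
    intro r pos c a0 rest res hn hc hca
    by_cases hpr : pos < r
    · rw [PySem.List.pyRange_one_cons (by omega), List.foldl_cons]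
      by_cases hhit : a0 = c + 1
      · have hstep : stepA rib (some (c, a0 :: rest, res)) (pos + 1) =
            (if rib = 0 then none
             else some (0, rest ++ [a0], res ++ [pvNib (pos + 1) rib])) := by
          simp [stepA, PySem.List.pop?_zero_cons, hhit]
        rw [hstep]
        have h1 : pos + (a0 - c) = pos + 1 := by omega
        rw [h1, if_pos (show pos + 1 ≤ r by omega)]
      · have hstep : stepA rib (some (c, a0 :: rest, res)) (pos + 1) =
            some (c + 1, a0 :: rest, res) := by
          simp [stepA]
          intro h; omega
        rw [hstep, ih r (pos + 1) (c + 1) a0 rest res (by omega) (by omega) (by omega)]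
        have h2 : pos + 1 + (a0 - (c + 1)) = pos + (a0 - c) := by omega
        rw [h2]
        by_cases h3 : pos + (a0 - c) ≤ r
        · rw [if_pos h3, if_pos h3]
        · rw [if_neg h3, if_neg h3]
          have h4 : c + 1 + max (r - (pos + 1)) 0 = c + max (r - pos) 0 := by omega
          rw [h4]
    · rw [PySem.List.pyRange_one_eq_nil (by omega)]
      have : ¬ pos + (a0 - c) ≤ r := by omega
      simp only [List.foldl_nil, if_neg this]
      have : max (r - pos) 0 = 0 := by omega
      rw [this]; ring_nf

-- a non-positive head never matches the (positive) counter: the fold only ticks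
theorem deadA (rib : Int) : ∀ n : Nat, ∀ r pos c a0 : Int, ∀ rest res : List Int,
    (r - pos).toNat = n → 0 ≤ c → a0 ≤ 0 →
    (PySem.List.pyRange (pos + 1) (r + 1) 1).foldl (stepA rib) (some (c, a0 :: rest, res)) =
      some (c + max (r - pos) 0, a0 :: rest, res) := by
  intro n
  induction n with
  | zero =>
    intro r pos c a0 rest res hn hc ha
    rw [PySem.List.pyRange_one_eq_nil (by omega)]
    have : max (r - pos) 0 = 0 := by omega
    simp only [List.foldl_nil, this]; ring_nf
  | succ m ih =>
    intro r pos c a0 rest res hn hc ha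
    by_cases hpr : pos < r
    · rw [PySem.List.pyRange_one_cons (by omega), List.foldl_cons]
      have hstep : stepA rib (some (c, a0 :: rest, res)) (pos + 1) =
          some (c + 1, a0 :: rest, res) := by
        simp [stepA]
        intro h; omega
      rw [hstep, ih r (pos + 1) (c + 1) a0 rest res (by omega) (by omega) ha]
      have : c + 1 + max (r - (pos + 1)) 0 = c + max (r - pos) 0 := by omega
      rw [this]
    · rw [PySem.List.pyRange_one_eq_nil (by omega)]
      have : max (r - pos) 0 = 0 := by omega
      simp only [List.foldl_nil, this]; ring_nf

-- the rotated view of adding_each that A carries, expressed by B's cyclic index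
theorem rot_cons (ae : List Int) (k : Nat) (hk : k < ae.length) :
    ae.drop k ++ ae.take k = ae[k] :: (ae.drop (k + 1) ++ ae.take k) := by
  rw [List.drop_eq_getElem_cons hk]
  rfl

theorem rot_succ (ae : List Int) (k : Nat) (hk : k < ae.length) :
    (ae.drop (k + 1) ++ ae.take k) ++ [ae[k]] =
      ae.drop (k + 1) ++ ae.take (k + 1) := by
  rw [List.append_assoc, List.take_add_one, List.getElem?_eq_getElem hk]
  rfl

-- main correspondence: A's fold over the rotated list from a fresh counter produces
-- exactly B's cyclic-index jump loop results
theorem mainA (rib : Int) : ∀ n : Nat, ∀ r pos : Int, ∀ ae : List Int, ∀ k : Nat, ∀ res : List Int,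
    (r - pos).toNat ≤ n →
    (k < ae.length ∨ (k = 0 ∧ ae = [])) →
    (pos < r → ae ≠ []) →
    (rib = 0 → ¬ (1 ≤ (ae.drop k ++ ae.take k).headI ∧ pos + (ae.drop k ++ ae.take k).headI ≤ r)) →
    ∃ c ae', (PySem.List.pyRange (pos + 1) (r + 1) 1).foldl (stepA rib)
        (some (0, ae.drop k ++ ae.take k, res)) =
      some (c, ae', altLoop r rib ae (ae.length : Int) (k : Int) pos res) := by
  intro n
  induction n with
  | zero =>
    intro r pos ae k res hn _ _ _
    rw [PySem.List.pyRange_one_eq_nil (by omega)]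
    rw [altLoop_stop r rib _ _ pos ae res (by omega)]
    exact ⟨0, ae.drop k ++ ae.take k, rfl⟩
  | succ m ih =>
    intro r pos ae k res hn hk hne hrib
    by_cases hpr : pos < r
    · have hae : ae ≠ [] := hne hpr
      have hklt : k < ae.length := by
        rcases hk with h | ⟨_, h⟩
        · exact h
        · exact absurd h hae
      have hget : PySem.List.pyGet? ae (k : Int) = some ae[k] := by
        rw [PySem.List.pyGet?_natCast, List.getElem?_eq_getElem hklt]
      have hrot := rot_cons ae k hklt
      by_cases hpos : 1 ≤ ae[k]
      · rw [hrot, tickA rib (r - pos).toNat r pos 0 ae[k] _ res rfl le_rfl (by omega)]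
        by_cases hin : pos + (ae[k] - 0) ≤ r
        · rw [if_pos hin]
          have hrib' : rib ≠ 0 := by
            intro h0
            refine hrib h0 ?_
            rw [hrot]
            exact ⟨by simpa using hpos, by simp; omega⟩
          rw [if_neg hrib']
          have h1 : pos + (ae[k] - 0) = pos + ae[k] := by omega
          rw [h1, rot_succ ae k hklt]
          -- the next cyclic index
          by_cases hwrap : k + 1 = ae.length
          · have hd : ae.drop (k + 1) ++ ae.take (k + 1) = ae.drop 0 ++ ae.take 0 := by
              rw [hwrap]; simp
            obtain ⟨c, ae', heq⟩ := ih r (pos + ae[k]) ae 0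
              (res ++ [pvNib (pos + ae[k]) rib]) (by omega)
              (by rcases ae with _ | ⟨x, xs⟩
                  · exact Or.inr ⟨rfl, rfl⟩
                  · exact Or.inl (by simp))
              (fun _ => hae) (fun h0 => absurd h0 hrib')
            refine ⟨c, ae', ?_⟩
            rw [hd, heq,
              altLoop_get_step r rib (ae.length : Int) (k : Int) pos ae[k] ae res hpr hget
                (by omega)]
            have : ((k : Int) + 1 = (ae.length : Int)) := by exact_mod_cast hwrap
            rw [if_pos this]
            norm_num
          · have hklt' : k + 1 < ae.length := by omega
            obtain ⟨c, ae', heq⟩ := ih r (pos + ae[k]) ae (k + 1)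
              (res ++ [pvNib (pos + ae[k]) rib]) (by omega)
              (Or.inl hklt') (fun _ => hae) (fun h0 => absurd h0 hrib')
            refine ⟨c, ae', ?_⟩
            rw [heq,
              altLoop_get_step r rib (ae.length : Int) (k : Int) pos ae[k] ae res hpr hget
                (by omega)]
            have hne' : ¬ ((k : Int) + 1 = (ae.length : Int)) := by
              intro h; exact absurd (by exact_mod_cast h) (by omega : ¬ k + 1 = ae.length)
            rw [if_neg hne']
            norm_num
        · rw [if_neg hin]
          rw [altLoop_get_stop r rib (ae.length : Int) (k : Int) pos ae[k] ae res hpr hget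
            (by omega)]
          exact ⟨0 + max (r - pos) 0, _, rfl⟩
      · rw [hrot, deadA rib (r - pos).toNat r pos 0 ae[k] _ res rfl le_rfl (by omega)]
        rw [altLoop_get_stop r rib (ae.length : Int) (k : Int) pos ae[k] ae res hpr hget
          (by omega)]
        exact ⟨0 + max (r - pos) 0, _, rfl⟩
    · rw [PySem.List.pyRange_one_eq_nil (by omega)]
      rw [altLoop_stop r rib _ _ pos ae res hpr]
      exact ⟨0, ae.drop k ++ ae.take k, rfl⟩

-- ===== VERDICT (by name: the statement is the Claim_ definition above) =====
theorem calculate_nums_in_block_spec : Claim_equal_calculate_nums_in_block := by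
  intro row_num starting_from rows_in_block adding_each results_num _hdom hpre
  obtain ⟨hne, hrib⟩ := hpre
  unfold Spec_calculate_nums_in_block calculate_nums_in_block calculate_nums_in_block_alt
  obtain ⟨c, ae', heq⟩ := mainA rows_in_block (row_num - (pvOrOne starting_from - 1)).toNat
    row_num (pvOrOne starting_from - 1) adding_each 0 [] le_rfl
    (by rcases adding_each with _ | ⟨x, xs⟩
        · exact Or.inr ⟨rfl, rfl⟩
        · exact Or.inl (by simp))
    (fun h => hne (by omega))
    (fun h0 h1 => by
      simp only [List.drop_zero, List.take_zero, List.append_nil] at h1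
      refine hrib h0 ⟨?_, h1.1, h1.2⟩
      intro hnil
      rw [hnil] at h1
      simp [List.headI] at h1)
  rw [(by omega : pvOrOne starting_from - 1 + 1 = pvOrOne starting_from),
    (by simp : adding_each.drop 0 ++ adding_each.take 0 = adding_each)] at heq
  simp only [heq, Nat.cast_zero]
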